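-- pv_equiv track=rewrite | github.com/mikesndrs/advent_of_code | aoc/aoc_2025/python/ex_08.py | add_to_group_list
-- ===== SOURCE A (Python) =====
-- from typing import List, Tuple, Set
--
-- POS = Tuple[int, ...]
--
-- GROUP = Set[POS]
--
-- def add_to_group_list(pos: POS, nbr: POS, group_list: List[GROUP]) -> List[GROUP]:
--     """Add new box to group"""
--     new_group = set([pos, nbr])
--     for i, group in reversed(list(enumerate(group_list))):
--         if pos in group or nbr in group:
--             new_group = new_group | set(group)
--             group_list.pop(i)
--     group_list.append(new_group)
--     return group_list
-- ===== SOURCE B (Python) =====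
-- def add_to_group_list(pos, nbr, group_list):
--     """Add new box to group"""
--     def go(groups):
--         # returns (kept groups of this suffix in order, union of {pos, nbr} with all matching groups of this suffix)
--         if not groups:
--             return [], {pos, nbr}
--         rest, merged = go(groups[1:])
--         head = groups[0]
--         if pos in head or nbr in head:
--             return rest, merged | head
--         return [head] + rest, merged
--     rest, merged = go(group_list)
--     group_list[:] = rest + [merged]
--     return group_list
-- ===== Notes on version B (the rewrite author's own statement) =====
-- stated objective: alternative
-- what changed: Replaces A's imperative reversed enumerate-and-pop mutation loop with a pure structural recursion that returns, for each list suffix, the pair (non-matching groups, merged set), then writes rest + [merged] back in place.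
import Mathlib
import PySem

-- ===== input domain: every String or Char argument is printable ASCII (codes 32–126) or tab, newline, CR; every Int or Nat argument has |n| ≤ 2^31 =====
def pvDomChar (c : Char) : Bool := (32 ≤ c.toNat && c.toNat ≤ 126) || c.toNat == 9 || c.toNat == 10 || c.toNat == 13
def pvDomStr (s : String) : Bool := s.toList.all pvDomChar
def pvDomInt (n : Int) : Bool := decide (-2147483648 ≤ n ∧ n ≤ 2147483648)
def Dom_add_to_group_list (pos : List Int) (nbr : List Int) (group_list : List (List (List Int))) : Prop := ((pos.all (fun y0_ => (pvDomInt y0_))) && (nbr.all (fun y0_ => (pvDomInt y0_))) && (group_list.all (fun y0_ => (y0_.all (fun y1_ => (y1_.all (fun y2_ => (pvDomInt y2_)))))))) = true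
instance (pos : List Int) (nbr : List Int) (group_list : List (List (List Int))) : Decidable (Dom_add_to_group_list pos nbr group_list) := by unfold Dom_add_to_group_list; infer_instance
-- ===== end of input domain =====

-- B replaces A's reversed enumerate-and-pop mutation loop with a pure structural recursion
-- returning (kept groups, merged set); both mutate group_list in place to the same final contents.

-- ===== PORT A =====
-- loop body of A: on (new_group, group_list) and one reversed-enumerate pair (i, group)
def atgStep (pos nbr : List Int) (st : List (List Int) × List (List (List Int)))
    (p : Int × List (List Int)) : List (List Int) × List (List (List Int)) :=
  if pos ∈ p.2 ∨ nbr ∈ p.2 then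
    (PySem.Set.union st.1 (PySem.Set.ofList p.2),
     match PySem.List.pop? st.2 p.1 with
     | some r => r.2
     | none => st.2)
  else st

def add_to_group_list (pos : List Int) (nbr : List Int) (group_list : List (List (List Int))) : List (List (List Int)) :=
  let st := ((PySem.List.enumerate group_list).reverse).foldl (atgStep pos nbr)
              (PySem.Set.ofList [pos, nbr], group_list)
  st.2 ++ [st.1]

-- ===== PORT B =====
-- B's recursive helper go: (kept groups of the suffix, union of {pos,nbr} with its matching groups)
def atgGo (pos nbr : List Int) : List (List (List Int)) → List (List (List Int)) × List (List Int)
  | [] => ([], PySem.Set.ofList [pos, nbr])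
  | head :: tl =>
    let r := atgGo pos nbr tl
    if pos ∈ head ∨ nbr ∈ head then (r.1, PySem.Set.union r.2 (PySem.Set.ofList head))
    else (head :: r.1, r.2)

def add_to_group_list_alt (pos : List Int) (nbr : List Int) (group_list : List (List (List Int))) : List (List (List Int)) :=
  let r := atgGo pos nbr group_list
  r.1 ++ [r.2]

-- ===== PRECONDITION & SPEC =====
def Spec_add_to_group_list (pos : List Int) (nbr : List Int) (group_list : List (List (List Int))) (out : List (List (List Int))) : Prop := out = add_to_group_list_alt pos nbr group_list
instance (pos : List Int) (nbr : List Int) (group_list : List (List (List Int))) (out : List (List (List Int))) : Decidable (Spec_add_to_group_list pos nbr group_list out) := by unfold Spec_add_to_group_list; infer_instance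

-- ===== CLAIM (what is proved, stated in full; the proofs are below) =====
def Claim_equal_add_to_group_list : Prop := ∀ (pos : List Int) (nbr : List Int) (group_list : List (List (List Int))), Dom_add_to_group_list pos nbr group_list → Spec_add_to_group_list pos nbr group_list (add_to_group_list pos nbr group_list)

-- ===== LEMMAS AND PROOFS =====

theorem atg_erase_mid {α : Type} (y : α) (ys : List α) : ∀ xs : List α, (xs ++ y :: ys).eraseIdx xs.length = xs ++ ys
  | [] => by simp
  | x :: xs => by simp [atg_erase_mid y ys xs]

theorem atg_get_mid {α : Type} (y : α) (ys : List α) : ∀ (xs : List α) (h : xs.length < (xs ++ y :: ys).length), (xs ++ y :: ys)[xs.length] = y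
  | [], _ => by simp
  | x :: xs, _ => by simpa using atg_get_mid y ys xs (by simp)

-- pop at the index just before an untouched suffix
lemma atg_pop_mid (xs : List (List (List Int))) (y : List (List Int)) (ys : List (List (List Int))) :
    PySem.List.pop? (xs ++ y :: ys) (xs.length : Int) = some (y, xs ++ ys) := by
  have h : xs.length < (xs ++ y :: ys).length := by simp
  rw [PySem.List.pop?_natCast (xs ++ y :: ys) xs.length h]
  rw [atg_get_mid y ys xs h, atg_erase_mid y ys xs]

-- the match test as a Bool, for restating both programs through filters
def atgMatch (pos nbr : List Int) (g : List (List Int)) : Bool :=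
  decide (pos ∈ g) || decide (nbr ∈ g)

-- invariant of A's reversed enumerate-and-pop loop: with an untouched suffix attached,
-- it computes the reverse union fold over matching groups and keeps the non-matching ones
lemma atg_key (pos nbr : List Int) (gl : List (List (List Int))) :
    ∀ (s : List (List Int)) (suffix : List (List (List Int))),
      ((PySem.List.enumerate gl).reverse).foldl (atgStep pos nbr) (s, gl ++ suffix)
      = ((gl.filter (atgMatch pos nbr)).reverse.foldl
            (fun s g => PySem.Set.union s (PySem.Set.ofList g)) s,
         gl.filter (fun g => !(atgMatch pos nbr g)) ++ suffix) := by
  induction gl using List.reverseRecOn with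
  | nil => intro s suffix; simp [PySem.List.enumerate]
  | append_singleton gl g ih =>
    intro s suffix
    have he : PySem.List.enumerate (gl ++ [g]) 0
        = PySem.List.enumerate gl 0 ++ [((gl.length : Int), g)] := by
      simp [PySem.List.enumerate_append]
    by_cases hm : pos ∈ g ∨ nbr ∈ g
    · have hb : atgMatch pos nbr g = true := by
        simp [atgMatch]; tauto
      rw [he]
      simp only [List.reverse_append, List.reverse_singleton, List.singleton_append,
        List.foldl_cons]
      have hstep : atgStep pos nbr (s, gl ++ [g] ++ suffix) ((gl.length : Int), g)
          = (PySem.Set.union s (PySem.Set.ofList g), gl ++ suffix) := by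
        have := atg_pop_mid gl g suffix
        simp [atgStep, hm, List.append_assoc] at this ⊢
        rw [this]
      rw [hstep, ih]
      simp [hb, List.filter_append]
    · have hb : atgMatch pos nbr g = false := by
        simp [atgMatch]; tauto
      rw [he]
      simp only [List.reverse_append, List.reverse_singleton, List.singleton_append,
        List.foldl_cons]
      have hstep : atgStep pos nbr (s, gl ++ [g] ++ suffix) ((gl.length : Int), g)
          = (s, gl ++ ([g] ++ suffix)) := by
        simp [atgStep, hm, List.append_assoc]
      rw [hstep, ih]
      simp [hb, List.filter_append]

-- B's recursion computes the same filter and reverse union fold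
lemma atgGo_eq (pos nbr : List Int) : ∀ gl : List (List (List Int)),
    atgGo pos nbr gl
    = (gl.filter (fun g => !(atgMatch pos nbr g)),
       (gl.filter (atgMatch pos nbr)).reverse.foldl
         (fun s g => PySem.Set.union s (PySem.Set.ofList g)) (PySem.Set.ofList [pos, nbr]))
  | [] => by simp [atgGo]
  | g :: tl => by
    by_cases hm : pos ∈ g ∨ nbr ∈ g
    · have hb : atgMatch pos nbr g = true := by simp [atgMatch]; tauto
      simp [atgGo, hm, atgGo_eq pos nbr tl, hb, List.foldl_append]
    · have hb : atgMatch pos nbr g = false := by simp [atgMatch]; tauto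
      simp [atgGo, hm, atgGo_eq pos nbr tl, hb]

-- ===== VERDICT (by name: the statement is the Claim_ definition above) =====
theorem add_to_group_list_spec : Claim_equal_add_to_group_list := by
  intro pos nbr gl _
  show add_to_group_list pos nbr gl = add_to_group_list_alt pos nbr gl
  unfold add_to_group_list add_to_group_list_alt
  have hA := atg_key pos nbr gl (PySem.Set.ofList [pos, nbr]) []
  simp only [List.append_nil] at hA
  rw [hA, atgGo_eq]
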